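-- pv_equiv track=rewrite | github.com/OpenJ92/Data-Structures-Algorithms | problems/python/2140.py | mostPoints
-- ===== SOURCE A (Python) =====
-- from typing import List
--
-- def mostPoints(questions: List[List[int]]) -> int:
--     length = len(questions)
--
--     dynamic_program     = [0] * length
--     dynamic_program[-1] = questions[-1][0]
--
--     for index in range(length-2, -1, -1):
--         take, brainpower = questions[index]
--         next = index + brainpower + 1
--         if  next < length:
--             take += dynamic_program[next]
--         skip = dynamic_program[index+1]
--
--         dynamic_program[index] = max(take, skip)
--
--     return dynamic_program[0]
-- ===== SOURCE B (Python) =====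
-- def mostPoints(questions):
--     # Forward push DP. dp[j] = best total from the first i questions whose
--     # next free slot is j (slot n means "jumped past the end").  Each question
--     # pushes its skip value to dp[i+1] and its take value to dp[i+bp+1].
--     # The final question needs no brainpower bookkeeping: a run that is still
--     # free at the last slot simply takes it.
--     n = len(questions)
--     dp = [0] * (n + 1)
--     for i in range(n - 1):
--         points, brainpower = questions[i]
--         dp[i + 1] = max(dp[i + 1], dp[i])
--         j = min(i + brainpower + 1, n)
--         dp[j] = max(dp[j], dp[i] + points)
--     return max(dp[n - 1] + questions[n - 1][0], dp[n])
-- ===== Notes on version B (the rewrite author's own statement) =====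
-- stated objective: alternative
-- what changed: Replaces A's backward pull DP (table filled right-to-left, each cell pulling from a later cell) by a forward push DP over dp[0..n] in which each of the first n-1 questions propagates its skip value to dp[i+1] and its take value to dp[min(i+bp+1,n)], the last question being taken whenever a run is still free at its slot; Pre_ restricts to the problem's natural domain (nonnegative brainpower on non-final questions, nonnegative points on the final one), outside which A's value comes from reading a not-yet-filled or negatively-wrapped table slot, or from force-taking a negative final question.
-- outside the precondition, e.g. on mostPoints([[1, -3], [2, 0]]): A returns 2, B returns 3; on mostPoints([[5, -2], [1, 0]]): A returns 6, B returns 5; on mostPoints([[-5, 0]]): A returns -5, B returns 0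
import Mathlib
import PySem

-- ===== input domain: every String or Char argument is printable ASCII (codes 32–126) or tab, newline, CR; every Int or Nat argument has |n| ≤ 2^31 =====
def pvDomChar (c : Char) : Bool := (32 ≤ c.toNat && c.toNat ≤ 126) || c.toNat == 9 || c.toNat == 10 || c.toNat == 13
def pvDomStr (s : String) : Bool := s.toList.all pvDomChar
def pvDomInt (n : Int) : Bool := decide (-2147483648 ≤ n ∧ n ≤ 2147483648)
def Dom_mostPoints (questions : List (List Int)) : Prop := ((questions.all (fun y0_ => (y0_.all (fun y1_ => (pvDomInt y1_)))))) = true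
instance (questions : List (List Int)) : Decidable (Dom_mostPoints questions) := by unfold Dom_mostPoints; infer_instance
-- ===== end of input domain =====

-- B replaces A's backward pull DP table by a forward push DP over dp[0..n]
-- (the last question is taken whenever a run is still free at its slot, as in
-- A's base case); same O(n) cost (objective: alternative).

-- ===== PORT A =====
-- the loop body of A (dp is the mutable list, index the loop variable)
def stepA (questions : List (List Int)) (length : Int) (dp : List Int) (index : Int) : List Int :=
  let q := PySem.List.pyGetD questions index []
  let take := PySem.List.pyGetD q 0 0
  let brainpower := PySem.List.pyGetD q 1 0
  let next := index + brainpower + 1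
  let take := if next < length then take + PySem.List.pyGetD dp next 0 else take
  let skip := PySem.List.pyGetD dp (index + 1) 0
  PySem.List.pySetD dp index (max take skip)

def mostPoints (questions : List (List Int)) : Int :=
  let length : Int := questions.length
  let dp : List Int := List.replicate questions.length 0
  let dp := PySem.List.pySetD dp (-1) (PySem.List.pyGetD (PySem.List.pyGetD questions (-1) []) 0 0)
  let dp := (PySem.List.pyRange (length - 2) (-1) (-1)).foldl (stepA questions length) dp
  PySem.List.pyGetD dp 0 0

-- ===== PORT B =====
-- the loop body of B; the tuple unpack 'points, brainpower = questions[i]' is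
-- exact on the length-2 rows Pre_ admits
def stepB (questions : List (List Int)) (n : Int) (dp : List Int) (i : Int) : List Int :=
  let q := PySem.List.pyGetD questions i []
  let points := PySem.List.pyGetD q 0 0
  let brainpower := PySem.List.pyGetD q 1 0
  let dp := PySem.List.pySetD dp (i + 1)
    (max (PySem.List.pyGetD dp (i + 1) 0) (PySem.List.pyGetD dp i 0))
  let j := min (i + brainpower + 1) n
  PySem.List.pySetD dp j (max (PySem.List.pyGetD dp j 0) (PySem.List.pyGetD dp i 0 + points))

def mostPoints_alt (questions : List (List Int)) : Int :=
  let n : Int := questions.length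
  let dp : List Int := List.replicate (questions.length + 1) 0
  let dp := (PySem.List.pyRange 0 (n - 1) 1).foldl (stepB questions n) dp
  max (PySem.List.pyGetD dp (n - 1) 0 +
       PySem.List.pyGetD (PySem.List.pyGetD questions (n - 1) []) 0 0)
      (PySem.List.pyGetD dp n 0)

-- ===== PRECONDITION & SPEC =====
-- Pre_ restricts to the problem's natural domain (LeetCode 2140: nonnegative
-- brainpower, nonnegative points): outside it A's value comes from reading a
-- not-yet-filled or negatively-wrapped table slot (negative brainpower on a
-- non-final question) or from force-taking a negative final question, and B
-- makes the other defensible choice there; A raises on the remaining shapes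
-- (empty list, malformed rows).  Only the final question's points and the
-- non-final rows' [points, brainpower] pairs are read by A, so only they are
-- constrained.
def Pre_mostPoints (questions : List (List Int)) : Prop :=
  questions ≠ [] ∧
  1 ≤ ((questions.getLast?).getD []).length ∧
  0 ≤ ((questions.getLast?).getD []).getD 0 0 ∧
  ∀ i ∈ List.range (questions.length - 1),
    (questions.getD i []).length = 2 ∧ 0 ≤ (questions.getD i []).getD 1 0

instance (questions : List (List Int)) : Decidable (Pre_mostPoints questions) := by
  unfold Pre_mostPoints; infer_instance

def pvWitness_mostPoints : List (List Int) := [[3, 2], [4, 3], [4, 4], [2, 5]]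

def Spec_mostPoints (questions : List (List Int)) (out : Int) : Prop := out = mostPoints_alt questions
instance (questions : List (List Int)) (out : Int) : Decidable (Spec_mostPoints questions out) := by unfold Spec_mostPoints; infer_instance

-- ===== CLAIM (what is proved, stated in full; the proofs are below) =====
def Claim_equal_mostPoints : Prop := ∀ (questions : List (List Int)), Dom_mostPoints questions → Pre_mostPoints questions → Spec_mostPoints questions (mostPoints questions)

-- ===== LEMMAS AND PROOFS =====

-- the pull recurrence A computes: best score from slot i on, the final slot
-- forced to take its question (A's base case dp[-1] = questions[-1][0]); the
-- jump target is clamped below by i+1 only to make the definition total —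
-- under Pre_ the clamp is the identity
def pullG (qs : List (List Int)) (i : Nat) : Int :=
  if i + 1 = qs.length then (qs.getD i []).getD 0 0
  else if h : i + 1 < qs.length then
    max ((qs.getD i []).getD 0 0 +
         pullG qs (max (min ((i : Int) + (qs.getD i []).getD 1 0 + 1) (qs.length : Int)).toNat (i + 1)))
        (pullG qs (i + 1))
  else 0
termination_by qs.length - i
decreasing_by
  · have h2 : i + 1 ≤ max (min ((i : Int) + (qs.getD i []).getD 1 0 + 1) (qs.length : Int)).toNat (i + 1) :=
      le_max_right _ _
    omega
  · omega

lemma pullG_of_le (qs : List (List Int)) (i : Nat) (h : qs.length ≤ i) : pullG qs i = 0 := by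
  rw [pullG, if_neg (by omega), dif_neg (by omega)]

lemma pullG_base (qs : List (List Int)) (i : Nat) (h : i + 1 = qs.length) :
    pullG qs i = (qs.getD i []).getD 0 0 := by
  rw [pullG, if_pos h]

lemma pullG_succ_le (qs : List (List Int)) (i : Nat) (h : i + 1 < qs.length) :
    pullG qs (i + 1) ≤ pullG qs i := by
  conv_rhs => rw [pullG]
  rw [if_neg (by omega), dif_pos h]
  exact le_max_right _ _

lemma pullG_anti (qs : List (List Int)) {i j : Nat} (hij : i ≤ j) (hj : j < qs.length) :
    pullG qs j ≤ pullG qs i := by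
  induction j with
  | zero =>
    have : i = 0 := by omega
    subst this; rfl
  | succ j ih =>
    rcases Nat.lt_or_ge i (j + 1) with hlt | hge
    · exact le_trans (pullG_succ_le qs j hj) (ih (by omega) (by omega))
    · have : i = j + 1 := by omega
      subst this; rfl

lemma list_len2 (q : List Int) (h : q.length = 2) : ∃ p b, q = [p, b] := by
  rcases q with _ | ⟨p, t⟩
  · simp at h
  rcases t with _ | ⟨b, t⟩
  · simp at h
  rcases t with _ | ⟨c, t⟩
  · exact ⟨p, b, rfl⟩
  · simp at h

lemma getD_set_eq (l : List Int) (i j : Nat) (v : Int) :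
    (l.set i v).getD j 0 = if j = i ∧ i < l.length then v else l.getD j 0 := by
  simp only [List.getD, List.getElem?_set]
  split_ifs with h1 h2 <;> simp_all

lemma getD_replicate_zero (n j : Nat) : (List.replicate n (0 : Int)).getD j 0 = 0 := by
  simp only [List.getD, List.getElem?_replicate]
  split_ifs <;> simp

lemma pySetD_neg_one (l : List Int) (h : l ≠ []) (v : Int) :
    PySem.List.pySetD l (-1) v = l.set (l.length - 1) v := by
  have hl : 1 ≤ l.length := by cases l <;> simp_all
  simp only [PySem.List.pySetD, PySem.List.pySet?, PySem.List.pyIdx?]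
  norm_num
  simp [hl]

-- the two row facts Pre_ gives: a non-final row is a pair with 0 ≤ brainpower,
-- the final row starts with its (nonnegative) points
lemma rows_of_pre (qs : List (List Int)) (hpre : Pre_mostPoints qs) (i : Nat)
    (hi : i + 1 < qs.length) :
    ∃ p b, qs.getD i [] = [p, b] ∧ 0 ≤ b := by
  obtain ⟨hlen, hb⟩ := hpre.2.2.2 i (List.mem_range.2 (by omega))
  obtain ⟨p, b, hpb⟩ := list_len2 _ hlen
  rw [hpb] at hb ⊢
  exact ⟨p, b, rfl, by simpa using hb⟩

lemma last_of_pre (qs : List (List Int)) (hpre : Pre_mostPoints qs) :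
    (qs.getLast?).getD [] = qs.getD (qs.length - 1) [] := by
  have hne := hpre.1
  have hn : 1 ≤ qs.length := by cases qs <;> simp_all [Pre_mostPoints]
  rw [List.getLast?_eq_getElem?, List.getD_eq_getElem?_getD]

-- the pull recurrence in the form both step lemmas use (0 ≤ b kills the clamp)
lemma pullG_eq (qs : List (List Int)) (i : Nat) (hi : i + 1 < qs.length) (p b : Int)
    (hq : qs.getD i [] = [p, b]) (hb : 0 ≤ b) :
    pullG qs i = max (p + pullG qs (min ((i : Int) + b + 1) (qs.length : Int)).toNat)
                     (pullG qs (i + 1)) := by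
  rw [pullG, if_neg (by omega), dif_pos hi, hq]
  simp only [List.getD_cons_zero, List.getD_cons_succ]
  have hx : i + 1 ≤ (min ((i : Int) + b + 1) (qs.length : Int)).toNat := by omega
  rw [max_eq_left hx]

-- ---------- A side ----------

lemma stepA_inv (qs : List (List Int)) (hpre : Pre_mostPoints qs) (k : Nat) (hk : k + 1 < qs.length)
    (dp : List Int) (hlen : dp.length = qs.length)
    (hdp : ∀ j : Nat, dp.getD j 0 = if k + 1 ≤ j then pullG qs j else 0) :
    (stepA qs qs.length dp k).length = qs.length ∧
    ∀ j : Nat, (stepA qs qs.length dp k).getD j 0 = if k ≤ j then pullG qs j else 0 := by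
  obtain ⟨p, b, hq, hb⟩ := rows_of_pre qs hpre k hk
  have key : stepA qs (qs.length : Int) dp (k : Int) = dp.set k (pullG qs k) := by
    simp only [stepA, PySem.List.pyGetD_natCast, hq]
    have hg0 : PySem.List.pyGetD [p, b] 0 0 = p := by
      simp [PySem.List.pyGetD, PySem.List.pyGet?, PySem.List.pyIdx?]
    have hg1 : PySem.List.pyGetD [p, b] 1 0 = b := by
      simp [PySem.List.pyGetD, PySem.List.pyGet?, PySem.List.pyIdx?]
    rw [hg0, hg1, PySem.List.pySetD_natCast]
    congr 1
    have e2 : ((k : Int) + 1) = ((k + 1 : Nat) : Int) := by push_cast; ring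
    rw [e2, PySem.List.pyGetD_natCast, hdp (k + 1), if_pos le_rfl]
    rw [pullG_eq qs k hk p b hq hb]
    congr 1
    by_cases hlt : (k : Int) + b + 1 < (qs.length : Int)
    · rw [if_pos hlt]
      have hmin : min ((k : Int) + b + 1) (qs.length : Int) = (k : Int) + b + 1 := by omega
      have hcast : (k : Int) + b + 1 = ((((k : Int) + b + 1).toNat : Nat) : Int) := by omega
      rw [hmin, hcast, PySem.List.pyGetD_natCast, hdp, if_pos (by omega)]
      have hnn : ((((k : Int) + b + 1).toNat : Nat) : Int).toNat = ((k : Int) + b + 1).toNat := by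
        omega
      rw [hnn]
    · rw [if_neg hlt]
      have hmin : (min ((k : Int) + b + 1) (qs.length : Int)).toNat = qs.length := by omega
      rw [hmin, pullG_of_le qs qs.length le_rfl, add_zero]
  rw [key]
  refine ⟨by simp [hlen], fun j => ?_⟩
  rw [getD_set_eq]
  by_cases hj : j = k
  · rw [if_pos ⟨hj, by omega⟩, hj, if_pos le_rfl]
  · rw [if_neg (by tauto), hdp j]
    split_ifs with h1 h2 <;> first | rfl | omega

lemma foldA_inv (qs : List (List Int)) (hpre : Pre_mostPoints qs) :
    ∀ (k : Nat), k ≤ qs.length - 1 → ∀ (dp : List Int), dp.length = qs.length →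
    (∀ j : Nat, dp.getD j 0 = if k ≤ j then pullG qs j else 0) →
    ∀ j : Nat,
      ((PySem.List.pyRange ((k : Int) - 1) (-1) (-1)).foldl (stepA qs (qs.length : Int)) dp).getD j 0
        = if 0 ≤ j then pullG qs j else 0 := by
  intro k
  induction k with
  | zero =>
    intro _ dp hlen hdp j
    rw [show ((0 : Nat) : Int) - 1 = -1 by ring, PySem.List.pyRange_neg_one_eq_nil (by omega)]
    simp only [List.foldl_nil]
    rw [hdp j, if_pos (Nat.zero_le j)]
  | succ k ih =>
    intro hk dp hlen hdp j
    have hn : 1 ≤ qs.length := by cases qs <;> simp_all [Pre_mostPoints]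
    rw [show ((k + 1 : Nat) : Int) - 1 = (k : Int) by push_cast; ring,
        PySem.List.pyRange_neg_one_cons (by omega : (-1 : Int) < (k : Int)), List.foldl_cons]
    obtain ⟨hl2, hd2⟩ := stepA_inv qs hpre k (by omega) dp hlen hdp
    exact ih (by omega) _ hl2 hd2 j

-- ---------- B side ----------

-- the push-loop invariant value: best over table slots j ≥ k of dp[j] plus the
-- best continuation from slot j
def Mv (qs : List (List Int)) (k : Nat) (dp : List Int) : Int :=
  (insert qs.length (Finset.Icc k qs.length)).sup' (Finset.insert_nonempty _ _)
    (fun j => dp.getD j 0 + pullG qs j)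

-- membership in Mv's index set
lemma mem_MvSet (qs : List (List Int)) (k j : Nat) (h1 : k ≤ j) (h2 : j ≤ qs.length) :
    j ∈ insert qs.length (Finset.Icc k qs.length) :=
  Finset.mem_insert_of_mem (Finset.mem_Icc.2 ⟨h1, h2⟩)

lemma mem_MvSet_iff (qs : List (List Int)) (k j : Nat) (hk : k ≤ qs.length) :
    j ∈ insert qs.length (Finset.Icc k qs.length) ↔ k ≤ j ∧ j ≤ qs.length := by
  rw [Finset.mem_insert, Finset.mem_Icc]
  constructor
  · rintro (rfl | h) <;> omega
  · intro h; right; exact h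

lemma Mv_init (qs : List (List Int)) :
    Mv qs 0 (List.replicate (qs.length + 1) 0) = max (pullG qs 0) 0 := by
  apply le_antisymm
  · apply Finset.sup'_le
    intro j hj
    rw [mem_MvSet_iff qs 0 j (Nat.zero_le _)] at hj
    rw [getD_replicate_zero, zero_add]
    by_cases hjn : j < qs.length
    · exact le_trans (pullG_anti qs (Nat.zero_le j) hjn) (le_max_left _ _)
    · rw [pullG_of_le qs j (by omega)]
      exact le_max_right _ _
  · apply max_le
    · have := Finset.le_sup' (f := fun j => (List.replicate (qs.length + 1) (0 : Int)).getD j 0 + pullG qs j)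
        (mem_MvSet qs 0 0 le_rfl (Nat.zero_le _))
      rw [getD_replicate_zero, zero_add] at this
      exact this
    · have := Finset.le_sup' (f := fun j => (List.replicate (qs.length + 1) (0 : Int)).getD j 0 + pullG qs j)
        (mem_MvSet qs 0 qs.length (Nat.zero_le _) le_rfl)
      rw [getD_replicate_zero, zero_add, pullG_of_le qs qs.length le_rfl] at this
      exact this

lemma Mv_penult (qs : List (List Int)) (hn : 1 ≤ qs.length) (dp : List Int) :
    Mv qs (qs.length - 1) dp =
      max (dp.getD (qs.length - 1) 0 + pullG qs (qs.length - 1)) (dp.getD qs.length 0) := by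
  apply le_antisymm
  · apply Finset.sup'_le
    intro j hj
    rw [mem_MvSet_iff qs (qs.length - 1) j (by omega)] at hj
    by_cases hje : j = qs.length
    · subst hje
      rw [pullG_of_le qs qs.length le_rfl, add_zero]
      exact le_max_right _ _
    · have : j = qs.length - 1 := by omega
      subst this
      exact le_max_left _ _
  · apply max_le
    · exact Finset.le_sup' (f := fun j => dp.getD j 0 + pullG qs j)
        (mem_MvSet qs (qs.length - 1) (qs.length - 1) le_rfl (by omega))
    · have := Finset.le_sup' (f := fun j => dp.getD j 0 + pullG qs j)
        (mem_MvSet qs (qs.length - 1) qs.length (by omega) le_rfl)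
      rw [pullG_of_le qs qs.length le_rfl, add_zero] at this
      exact this

lemma stepB_inv (qs : List (List Int)) (i : Nat) (hi : i + 1 < qs.length) (p b : Int)
    (hq : qs.getD i [] = [p, b]) (hb : 0 ≤ b)
    (dp : List Int) (hlen : dp.length = qs.length + 1) :
    (stepB qs (qs.length : Int) dp (i : Int)).length = qs.length + 1 ∧
    Mv qs (i + 1) (stepB qs (qs.length : Int) dp (i : Int)) = Mv qs i dp := by
  have hg0 : PySem.List.pyGetD [p, b] 0 0 = p := by
    simp [PySem.List.pyGetD, PySem.List.pyGet?, PySem.List.pyIdx?]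
  have hg1 : PySem.List.pyGetD [p, b] 1 0 = b := by
    simp [PySem.List.pyGetD, PySem.List.pyGet?, PySem.List.pyIdx?]
  -- the clamped jump target as a Nat
  set jN : Nat := (min ((i : Int) + b + 1) (qs.length : Int)).toNat with hjN
  have hj1 : i + 1 ≤ jN := by omega
  have hj2 : jN ≤ qs.length := by omega
  have hjcast : min ((i : Int) + b + 1) (qs.length : Int) = ((jN : Nat) : Int) := by omega
  -- dp after the first assignment
  set dp1 : List Int := dp.set (i + 1) (max (dp.getD (i + 1) 0) (dp.getD i 0)) with hdp1
  have hlen1 : dp1.length = qs.length + 1 := by simp [hdp1, hlen]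
  have hstep : stepB qs (qs.length : Int) dp ((i : Int)) =
      dp1.set jN (max (dp1.getD jN 0) (dp1.getD i 0 + p)) := by
    have e1 : ((i : Int) + 1) = ((i + 1 : Nat) : Int) := by push_cast; ring
    simp only [stepB, PySem.List.pyGetD_natCast, hq, hg0, hg1, e1]
    rw [hjcast]
    simp only [PySem.List.pySetD_natCast, PySem.List.pyGetD_natCast]
    rw [← hdp1]
  -- values of dp1 / result by index
  have hdp1get : ∀ j : Nat, dp1.getD j 0 =
      if j = i + 1 then max (dp.getD (i + 1) 0) (dp.getD i 0) else dp.getD j 0 := by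
    intro j
    have h2 : i + 1 < dp.length := by omega
    rw [hdp1, getD_set_eq]
    simp [h2]
  have hdp1i : dp1.getD i 0 = dp.getD i 0 := by rw [hdp1get, if_neg (by omega)]
  set dp2 : List Int := dp1.set jN (max (dp1.getD jN 0) (dp1.getD i 0 + p)) with hdp2
  have hdp2get : ∀ j : Nat, dp2.getD j 0 =
      if j = jN then max (dp1.getD jN 0) (dp.getD i 0 + p) else dp1.getD j 0 := by
    intro j
    have h2 : jN < dp1.length := by omega
    rw [hdp2, getD_set_eq, hdp1i]
    simp [h2]
  -- the pull recurrence at i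
  have hpull : pullG qs i = max (p + pullG qs jN) (pullG qs (i + 1)) := by
    rw [pullG_eq qs i hi p b hq hb, hjcast]
    norm_num
  rw [hstep]
  refine ⟨by simp [hdp2, hlen1], ?_⟩
  apply le_antisymm
  · -- every new term is bounded by the old sup
    apply Finset.sup'_le
    intro j hj
    rw [mem_MvSet_iff qs (i + 1) j (by omega)] at hj
    have hji : i ≤ j := by omega
    have hold : ∀ l : Nat, i ≤ l → l ≤ qs.length →
        dp.getD l 0 + pullG qs l ≤ Mv qs i dp := fun l h1 h2 =>
      Finset.le_sup' (f := fun j => dp.getD j 0 + pullG qs j) (mem_MvSet qs i l h1 h2)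
    have hDi : dp.getD i 0 + pullG qs i ≤ Mv qs i dp := hold i le_rfl (by omega)
    have hDj : dp.getD j 0 + pullG qs j ≤ Mv qs i dp := hold j hji hj.2
    have hDi1 : dp.getD i 0 + pullG qs (i + 1) ≤ Mv qs i dp := by
      have := pullG_succ_le qs i hi
      omega
    have hDip : dp.getD i 0 + p + pullG qs jN ≤ Mv qs i dp := by
      have : p + pullG qs jN ≤ pullG qs i := by rw [hpull]; exact le_max_left _ _
      omega
    rw [hdp2get]
    by_cases hjj : j = jN
    · subst hjj
      rw [if_pos rfl, hdp1get]
      by_cases hjj1 : jN = i + 1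
      · rw [if_pos hjj1]
        have hD1 : dp.getD (i + 1) 0 + pullG qs jN ≤ Mv qs i dp := by
          rw [hjj1]
          exact hold (i + 1) (by omega) (by omega)
        have hD2 : dp.getD i 0 + pullG qs jN ≤ Mv qs i dp := by
          rw [hjj1]
          exact hDi1
        omega
      · rw [if_neg hjj1]
        have hDjN : dp.getD jN 0 + pullG qs jN ≤ Mv qs i dp :=
          hold jN (by omega) hj2
        omega
    · rw [if_neg hjj, hdp1get]
      by_cases hjj1 : j = i + 1
      · rw [if_pos hjj1]
        subst hjj1
        omega
      · rw [if_neg hjj1]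
        exact hDj
  · -- every old term is bounded by the new sup
    apply Finset.sup'_le
    intro j hj
    rw [mem_MvSet_iff qs i j (by omega)] at hj
    have hnew : ∀ l : Nat, i + 1 ≤ l → l ≤ qs.length →
        dp2.getD l 0 + pullG qs l ≤ Mv qs (i + 1) dp2 := fun l h1 h2 =>
      Finset.le_sup' (f := fun j => dp2.getD j 0 + pullG qs j) (mem_MvSet qs (i + 1) l h1 h2)
    -- dp2 dominates dp pointwise
    have hstep1 : ∀ l : Nat, dp.getD l 0 ≤ dp1.getD l 0 := by
      intro l
      rw [hdp1get]
      by_cases h : l = i + 1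
      · subst h
        rw [if_pos rfl]
        exact le_max_left _ _
      · rw [if_neg h]
    have hstep2 : ∀ l : Nat, dp1.getD l 0 ≤ dp2.getD l 0 := by
      intro l
      rw [hdp2get]
      by_cases h : l = jN
      · subst h
        rw [if_pos rfl]
        exact le_max_left _ _
      · rw [if_neg h]
    have hdom : ∀ l : Nat, dp.getD l 0 ≤ dp2.getD l 0 := fun l =>
      le_trans (hstep1 l) (hstep2 l)
    by_cases hji : j = i
    · subst hji
      rw [hpull]
      have hA : dp.getD j 0 + (p + pullG qs jN) ≤ Mv qs (j + 1) dp2 := by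
        have h1 : dp.getD j 0 + p ≤ dp2.getD jN 0 := by
          rw [hdp2get, if_pos rfl]
          exact le_max_right _ _
        have h2 := hnew jN hj1 hj2
        omega
      have hB : dp.getD j 0 + pullG qs (j + 1) ≤ Mv qs (j + 1) dp2 := by
        have h1 : dp.getD j 0 ≤ dp2.getD (j + 1) 0 := by
          have h0 : dp.getD j 0 ≤ dp1.getD (j + 1) 0 := by
            rw [hdp1get, if_pos rfl]
            exact le_max_right _ _
          exact le_trans h0 (hstep2 (j + 1))
        have h2 := hnew (j + 1) le_rfl (by omega)
        omega
      omega
    · have hj1' : i + 1 ≤ j := by omega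
      have := hdom j
      have := hnew j hj1' hj.2
      omega

lemma foldB_inv (qs : List (List Int)) (hpre : Pre_mostPoints qs) (hn : 1 ≤ qs.length) :
    ∀ (m k : Nat), k + m = qs.length - 1 → ∀ (dp : List Int), dp.length = qs.length + 1 →
      Mv qs (qs.length - 1)
          ((PySem.List.pyRange (k : Int) ((qs.length : Int) - 1) 1).foldl
            (stepB qs (qs.length : Int)) dp)
        = Mv qs k dp := by
  intro m
  induction m with
  | zero =>
    intro k hk dp hlen
    have hke : k = qs.length - 1 := by omega
    subst hke
    rw [show ((qs.length : Int) - 1) = ((qs.length - 1 : Nat) : Int) by omega,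
        PySem.List.pyRange_one_eq_nil (le_rfl)]
    simp only [List.foldl_nil]
  | succ m ih =>
    intro k hk dp hlen
    have hklt : k + 1 < qs.length := by omega
    obtain ⟨p, b, hq, hb⟩ := rows_of_pre qs hpre k hklt
    rw [PySem.List.pyRange_one_cons (by omega : (k : Int) < (qs.length : Int) - 1), List.foldl_cons]
    obtain ⟨hlen2, hMv2⟩ := stepB_inv qs k hklt p b hq hb dp hlen
    have e1 : ((k : Int) + 1) = ((k + 1 : Nat) : Int) := by push_cast; ring
    rw [e1]
    rw [ih (k + 1) (by omega) _ hlen2]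
    exact hMv2

-- ===== VERDICT (by name: the statement is the Claim_ definition above) =====
theorem mostPoints_spec : Claim_equal_mostPoints := by
  intro qs _ hpre
  unfold Spec_mostPoints
  have hne := hpre.1
  have hn : 1 ≤ qs.length := by cases qs <;> simp_all
  have hlast := last_of_pre qs hpre
  have hlastlen : 1 ≤ (qs.getD (qs.length - 1) []).length := by rw [← hlast]; exact hpre.2.1
  have hlastpt : 0 ≤ (qs.getD (qs.length - 1) []).getD 0 0 := by rw [← hlast]; exact hpre.2.2.1
  have hpullLast : pullG qs (qs.length - 1) = (qs.getD (qs.length - 1) []).getD 0 0 :=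
    pullG_base qs (qs.length - 1) (by omega)
  have hlastval : PySem.List.pyGetD (PySem.List.pyGetD qs (-1) []) 0 0 = pullG qs (qs.length - 1) := by
    rw [PySem.List.pyGetD_neg_one qs [] hne, PySem.List.pyGetD_zero, hpullLast]
    have : qs.getLast hne = qs.getD (qs.length - 1) [] := by
      rw [List.getLast_eq_getElem, List.getD_eq_getElem?_getD,
          List.getElem?_eq_getElem (by omega), Option.getD_some]
    rw [this]
  have hA : mostPoints qs = pullG qs 0 := by
    simp only [mostPoints]
    rw [hlastval, pySetD_neg_one _ (by simp; omega) _]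
    simp only [List.length_replicate]
    have hinit : ∀ j : Nat,
        ((List.replicate qs.length (0 : Int)).set (qs.length - 1) (pullG qs (qs.length - 1))).getD j 0
          = if qs.length - 1 ≤ j then pullG qs j else 0 := by
      intro j
      rw [getD_set_eq]
      by_cases hj : j = qs.length - 1
      · rw [if_pos ⟨hj, by simp; omega⟩, hj, if_pos le_rfl]
      · rw [if_neg (by simp; omega), getD_replicate_zero]
        by_cases hj2 : qs.length - 1 ≤ j
        · rw [if_pos hj2, pullG_of_le qs j (by omega)]
        · rw [if_neg hj2]
    have hfold := foldA_inv qs hpre (qs.length - 1) le_rfl _ (by simp) hinit 0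
    rw [show ((qs.length : Int) - 2) = (((qs.length - 1 : Nat) : Int) - 1) by omega] at *
    rw [PySem.List.pyGetD_zero]
    exact hfold.trans (by rw [if_pos (Nat.zero_le 0)])
  have hB : mostPoints_alt qs = max (pullG qs 0) 0 := by
    simp only [mostPoints_alt]
    have hfold := foldB_inv qs hpre hn (qs.length - 1) 0 (by omega)
      (List.replicate (qs.length + 1) 0) (by simp)
    rw [show ((0 : Nat) : Int) = (0 : Int) by norm_num] at hfold
    rw [Mv_penult qs hn _] at hfold
    rw [Mv_init qs] at hfold
    have hcast1 : ((qs.length : Int) - 1) = ((qs.length - 1 : Nat) : Int) := by omega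
    rw [hcast1] at hfold ⊢
    rw [PySem.List.pyGetD_natCast, PySem.List.pyGetD_natCast, PySem.List.pyGetD_zero,
        PySem.List.pyGetD_natCast]
    rw [← hpullLast]
    exact hfold
  have hge : 0 ≤ pullG qs 0 := by
    have h1 : pullG qs (qs.length - 1) ≤ pullG qs 0 := pullG_anti qs (Nat.zero_le _) (by omega)
    rw [hpullLast] at h1
    omega
  rw [hA, hB, max_eq_left hge]
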